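-- pv_equiv track=rewrite | github.com/BabiPunSociu/LapTrinhMang__TCP-Socket__ChuanHoaXau | XauChuan_Server.py | xuly1
-- ===== SOURCE A (Python) =====
-- def xuly1(str_):
--     result =''
--     for i in range(len(str_)):
--             if str_[i] not in [' ',',','.']:
--                 if i==0:
--                     result += str(str_[i]).upper()
--                 else:
--                     result += str(str_[i]).lower()
--             else:
--                 result += str_[i]
--     return result
-- ===== SOURCE B (Python) =====
-- def xuly1(str_):
--     return str_[:1].upper() + str_[1:].lower()
-- ===== Notes on version B (the rewrite author's own statement) =====
-- stated objective: idiomatic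
-- what changed: Replaces the per-index loop with its branching by two slice-plus-method operations: uppercase the first one-character slice and lowercase the rest, relying on separators being uncased.
import Mathlib
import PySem

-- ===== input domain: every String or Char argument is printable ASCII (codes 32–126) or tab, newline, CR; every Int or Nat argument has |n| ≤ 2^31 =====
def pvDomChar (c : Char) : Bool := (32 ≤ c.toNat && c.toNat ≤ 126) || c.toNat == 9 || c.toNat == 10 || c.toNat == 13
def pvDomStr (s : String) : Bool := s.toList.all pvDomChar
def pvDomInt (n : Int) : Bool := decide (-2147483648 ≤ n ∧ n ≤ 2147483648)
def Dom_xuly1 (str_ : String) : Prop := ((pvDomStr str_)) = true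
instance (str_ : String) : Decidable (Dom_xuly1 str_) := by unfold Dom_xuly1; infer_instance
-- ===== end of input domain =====

-- B replaces the per-index loop and branching by two slice-plus-method operations (upper the first slice, lower the rest); objective: idiomatic.

-- ===== PORT A =====
-- the 'for i in range(len(str_))' loop, carried as structural recursion over the characters with the index i and the accumulator result
def xuly1Go : List Char → Nat → List Char → List Char
  | [], _, result => result
  | c :: rest, i, result =>
      xuly1Go rest (i + 1)
        (if c ∉ [' ', ',', '.'] then
          (if i = 0 then result ++ PySem.Chars.upper [c]
           else result ++ PySem.Chars.lower [c])
         else result ++ [c])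

def xuly1 (str_ : String) : String :=
  String.ofList (xuly1Go str_.toList 0 [])

-- ===== PORT B =====
def xuly1_alt (str_ : String) : String :=
  String.ofList
    (PySem.Chars.upper (PySem.List.slice str_.toList none (some 1)) ++
     PySem.Chars.lower (PySem.List.slice str_.toList (some 1) none))

-- ===== PRECONDITION & SPEC =====
def Spec_xuly1 (str_ : String) (out : String) : Prop := out = xuly1_alt str_
instance (str_ : String) (out : String) : Decidable (Spec_xuly1 str_ out) := by unfold Spec_xuly1; infer_instance

-- ===== CLAIM (what is proved, stated in full; the proofs are below) =====
def Claim_equal_xuly1 : Prop := ∀ (str_ : String), Dom_xuly1 str_ → Spec_xuly1 str_ (xuly1 str_)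

-- ===== LEMMAS AND PROOFS =====

-- a separator is a fixpoint of lowerChar and upperChar
lemma lowerChar_sep {c : Char} (h : c ∈ [' ', ',', '.']) : PySem.Chars.lowerChar c = c := by
  simp only [List.mem_cons, List.not_mem_nil, or_false] at h
  rcases h with h | h | h <;> subst h <;> decide

lemma upperChar_sep {c : Char} (h : c ∈ [' ', ',', '.']) : PySem.Chars.upperChar c = c := by
  simp only [List.mem_cons, List.not_mem_nil, or_false] at h
  rcases h with h | h | h <;> subst h <;> decide

-- the loop from index i ≥ 1 onward lowercases every remaining character
lemma xuly1Go_pos (s : List Char) : ∀ (i : Nat) (acc : List Char), i ≠ 0 →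
    xuly1Go s i acc = acc ++ PySem.Chars.lower s := by
  induction s with
  | nil => intro i acc _; simp [xuly1Go, PySem.Chars.lower]
  | cons c rest ih =>
    intro i acc hi
    by_cases hc : c ∈ [' ', ',', '.']
    · simp [xuly1Go, hc, ih (i + 1) _ (by omega), PySem.Chars.lower, lowerChar_sep hc]
    · simp [xuly1Go, hc, hi, ih (i + 1) _ (by omega), PySem.Chars.lower]

lemma xuly1Go_main (s : List Char) :
    xuly1Go s 0 [] = PySem.Chars.upper (s.take 1) ++ PySem.Chars.lower (s.drop 1) := by
  cases s with
  | nil => simp [xuly1Go, PySem.Chars.upper, PySem.Chars.lower]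
  | cons c rest =>
    by_cases hc : c ∈ [' ', ',', '.']
    · simp [xuly1Go, hc, xuly1Go_pos rest 1 _ one_ne_zero,
        PySem.Chars.upper, upperChar_sep hc]
    · simp [xuly1Go, hc, xuly1Go_pos rest 1 _ one_ne_zero, PySem.Chars.upper]

-- ===== VERDICT (by name: the statement is the Claim_ definition above) =====
theorem xuly1_spec : Claim_equal_xuly1 := by
  intro str_ _
  unfold Spec_xuly1 xuly1 xuly1_alt
  rw [xuly1Go_main, PySem.List.slice_from_one]
  have h1 : PySem.List.slice str_.toList none (some 1) = str_.toList.take 1 := by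
    simpa using PySem.List.slice_to (xs := str_.toList) (b := 1) (by norm_num)
  rw [h1, ← List.drop_one]
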